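/-
  jsmn ALWAYS STOPS, part 1: the inner loops. For a text shorter than 2^32 bytes
    * the scans of jsmn_parse_primitive and jsmn_parse_string (and the `\u` digits) stay inside the text and end within
      `js.length - pos + 1` rounds (`primScan_bounds`, `primScan_total`, `hexScan_bounds`, `strScan_step`, `strScan_total`, `strScan_bounds`);
    * a successful jsmn_parse_string / jsmn_parse_primitive leaves `pos` inside the text, not before where it was, and has allocated
      exactly one token (`parseString_next`, `parsePrimitive_next`); both end (`parseString_total`, `parsePrimitive_total`);
    * the walk up the parent links ends because the links decrease (`closeLinks_total`).
  Part 2 (the main loop, `parse_total`, `parse_result`) is Json/Jsmn/Total.lean.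
-/
import Json.Jsmn.Safe

namespace Jsmn

/-! ### the inner scans stay inside the text and end -/

/-- Where the scan of jsmn_parse_primitive ends: at a stop character inside the text, or where the loop test fails, at or after `pos`. -/
theorem primScan_bounds {cfg : Config} {js : List UInt8} (hlen : js.length < 4294967296) {fuel pos : Nat} {r : PrimScan}
    (hpos : pos ≤ js.length) (h : primScan cfg js fuel pos = some r) :
    match r with
    | .found q => pos ≤ q ∧ q < js.length ∧ primStop cfg (charAt js q) = true
    | .eoi q => pos ≤ q ∧ q ≤ js.length ∧ more js q = false
    | .bad => True := by
  induction fuel generalizing pos with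
  | zero => simp [primScan] at h
  | succ f ih =>
    rw [primScan] at h
    simp only at h
    split at h
    · rename_i hm
      have hlt := more_lt hm
      split at h
      · rename_i hs; cases h; exact ⟨Nat.le_refl _, hlt, hs⟩
      · split at h
        · cases h; trivial
        · rw [u32_succ (by omega)] at h
          have := ih (by omega) h
          cases r with
          | found q => exact ⟨by omega, this.2⟩
          | eoi q => exact ⟨by omega, this.2⟩
          | bad => trivial
    · rename_i hm
      cases h; exact ⟨Nat.le_refl _, hpos, by simpa using hm⟩

/-- The scan of jsmn_parse_primitive ends within `js.length - pos + 1` rounds. -/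
theorem primScan_total {cfg : Config} {js : List UInt8} (hlen : js.length < 4294967296) {fuel pos : Nat}
    (hfuel : js.length - pos + 1 ≤ fuel) : ∃ r, primScan cfg js fuel pos = some r := by
  induction fuel generalizing pos with
  | zero => omega
  | succ f ih =>
    rw [primScan]
    simp only
    split
    · rename_i hm
      have hlt := more_lt hm
      split
      · exact ⟨_, rfl⟩
      · split
        · exact ⟨_, rfl⟩
        · rw [u32_succ (by omega)]
          exact ih (by omega)
    · exact ⟨_, rfl⟩

/-- The digits after `\u`: the scan stays inside the text. -/
theorem hexScan_bounds {js : List UInt8} (hlen : js.length < 4294967296) {k pos q : Nat} (hpos : pos ≤ js.length)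
    (h : hexScan js k pos = some q) : pos ≤ q ∧ q ≤ js.length := by
  induction k generalizing pos with
  | zero => simp [hexScan] at h; omega
  | succ k ih =>
    rw [hexScan] at h
    split at h
    · rename_i hm
      have hlt := more_lt hm
      split at h
      · rw [u32_succ (by omega)] at h
        have := ih (by omega) h
        omega
      · cases h
    · cases h; omega

/-- One round of the scan of jsmn_parse_string from `pos` (inside the text): it answers, or goes on from a position after `pos` and not
beyond the end of the text. -/
theorem strScan_step {js : List UInt8} (hlen : js.length < 4294967296) (pos : Nat) :
    (∃ r, (∀ q, r = .quote q → q = pos ∧ pos < js.length) ∧ ∀ f, strScan js (f + 1) pos = some r) ∨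
    (∃ pos', pos < pos' ∧ pos' ≤ js.length ∧ ∀ f, strScan js (f + 1) pos = strScan js f pos') := by
  by_cases hm : more js pos = true
  · have hlt := more_lt hm
    by_cases hq : (charAt js pos == 0x22) = true
    · exact Or.inl ⟨.quote pos, (fun q h => by cases h; exact ⟨rfl, hlt⟩), fun f => by rw [strScan, if_pos hm]; simp only [hq, if_true]⟩
    · have hu : u32 ((pos : Int) + 1) = pos + 1 := u32_succ (by omega)
      by_cases hb : (charAt js pos == 0x5c && decide (pos + 1 < js.length)) = true
      · have hlt2 : pos + 1 < js.length := by
          simp only [Bool.and_eq_true, decide_eq_true_eq] at hb; exact hb.2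
        have hu2 : u32 (((pos + 1 : Nat) : Int) + 1) = pos + 2 := u32_succ (by omega)
        by_cases he : isSimpleEscape (charAt js (pos + 1)) = true
        · refine Or.inr ⟨pos + 2, by omega, by omega, fun f => ?_⟩
          rw [strScan, if_pos hm]; simp only [hq, hb, hu, he, hu2, if_true]; simp
        · by_cases hu' : (charAt js (pos + 1) == 0x75) = true
          · cases hh : hexScan js 4 (pos + 2) with
            | none =>
              exact Or.inl ⟨.bad, (fun q h => by cases h), fun f => by rw [strScan, if_pos hm]; simp only [hq, hb, hu, he, hu', hu2, hh, if_true]; simp⟩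
            | some q =>
              have ⟨h1, h2⟩ := hexScan_bounds hlen (by omega) hh
              have hu3 : u32 ((u32 ((q : Int) - 1) : Nat) + 1) = q := by unfold u32; omega
              refine Or.inr ⟨q, by omega, h2, fun f => ?_⟩
              rw [strScan, if_pos hm]; simp only [hq, hb, hu, he, hu', hu2, hh, hu3, if_true]; simp
          · exact Or.inl ⟨.bad, (fun q h => by cases h), fun f => by rw [strScan, if_pos hm]; simp only [hq, hb, hu, he, hu', if_true]; simp⟩
      · refine Or.inr ⟨pos + 1, by omega, by omega, fun f => ?_⟩
        rw [strScan, if_pos hm]; simp only [hq, hu, hb]; simp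
  · exact Or.inl ⟨.eoi, (fun q h => by cases h), fun f => by rw [strScan, if_neg hm]⟩

/-- The scan of jsmn_parse_string from `pos` ends within `js.length - pos + 1` rounds. -/
theorem strScan_total {js : List UInt8} (hlen : js.length < 4294967296) {fuel pos : Nat} (hpos : pos ≤ js.length)
    (hfuel : js.length - pos + 1 ≤ fuel) : ∃ r, strScan js fuel pos = some r := by
  induction fuel generalizing pos with
  | zero => omega
  | succ f ih =>
    rcases strScan_step hlen pos with ⟨r, _, h⟩ | ⟨pos', h1, h2, h⟩
    · exact ⟨r, h f⟩
    · rw [h f]; exact ih h2 (by omega)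

/-- The closing quote the scan of jsmn_parse_string finds is at or after `pos`, inside the text. -/
theorem strScan_bounds {js : List UInt8} (hlen : js.length < 4294967296) {fuel pos q : Nat}
    (h : strScan js fuel pos = some (.quote q)) : pos ≤ q ∧ q < js.length := by
  induction fuel generalizing pos with
  | zero => simp [strScan] at h
  | succ f ih =>
    rcases strScan_step hlen pos with ⟨r, hr, h'⟩ | ⟨pos', h1, h2, h'⟩
    · rw [h' f] at h
      have := hr q (by simpa using h)
      omega
    · rw [h' f] at h
      have := ih h
      omega

/-! ### jsmn_parse_string, jsmn_parse_primitive, the parent links -/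

/-- A successful jsmn_parse_string leaves `pos` at the closing quote: after where it was, inside the text; and has allocated one token
(none in counting mode). -/
theorem parseString_next {cfg : Config} {js : List UInt8} (hlen : js.length < 4294967296) {fuel n : Nat} {p p' : Parser}
    {toks toks' : Option Tokens} {r : Int} (h : Inv cfg p toks n) (hpos : p.pos < js.length)
    (hp : parseString cfg js fuel p toks n = some (r, p', toks')) (hr : ¬ r < 0) :
    p.pos < p'.pos ∧ p'.pos < js.length ∧ p'.toknext = p.toknext + (if toks.isSome then 1 else 0) := by
  unfold parseString at hp
  simp only at hp
  have hu : u32 ((p.pos : Int) + 1) = p.pos + 1 := u32_succ (by omega)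
  rw [hu] at hp
  split at hp
  · cases hp
  · cases hp; exact absurd (by decide) hr
  · cases hp; exact absurd (by decide) hr
  · rename_i q hq
    have ⟨hq1, hq2⟩ := strScan_bounds hlen hq
    cases toks with
    | none => cases hp; exact ⟨by simp only; omega, hq2, rfl⟩
    | some ts =>
      simp only at hp
      cases ha : allocToken cfg { p with pos := q } ts n with
      | none => rw [ha] at hp; cases hp; exact absurd (by decide) hr
      | some x =>
        obtain ⟨i, p1, ts1⟩ := x
        rw [ha] at hp
        have hT : TokInv cfg { p with pos := q } ts n := h.tok.congr rfl rfl
        have ⟨hi, hin, htn, hpos', hsup, hT', hlen'⟩ := alloc_tok hT ha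
        cases hp
        simp only [Option.isSome_some, if_true]
        simp only at hi hpos'
        omega

/-- jsmn_parse_string ends when the fuel covers the rest of the text. -/
theorem parseString_total {cfg : Config} {js : List UInt8} (hlen : js.length < 4294967296) {fuel n : Nat} {p : Parser}
    {toks : Option Tokens} (hpos : p.pos < js.length) (hfuel : js.length - p.pos ≤ fuel) :
    ∃ x, parseString cfg js fuel p toks n = some x := by
  unfold parseString
  simp only
  have hu : u32 ((p.pos : Int) + 1) = p.pos + 1 := u32_succ (by omega)
  rw [hu]
  have ⟨r, hr⟩ := strScan_total hlen (fuel := fuel) (pos := p.pos + 1) (by omega) (by omega)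
  rw [hr]
  cases r with
  | bad => exact ⟨_, rfl⟩
  | eoi => exact ⟨_, rfl⟩
  | quote q =>
    simp only
    cases toks with
    | none => exact ⟨_, rfl⟩
    | some ts =>
      simp only
      cases allocToken cfg { p with pos := q } ts n with
      | none => exact ⟨_, rfl⟩
      | some x => exact ⟨_, rfl⟩

/-- The `found:` part of jsmn_parse_primitive, reached with the scan stopped at `q` AFTER the start: if it succeeds, `pos` is `q - 1`
and one token has been allocated (none in counting mode). -/
theorem primFound_next {cfg : Config} {p : Parser} {toks : Option Tokens} {n q : Nat} (h : Inv cfg p toks n) (hq : p.pos < q)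
    (hq32 : q < 4294967296) (hr : ¬ (primFound cfg p toks n q).1 < 0) :
    (primFound cfg p toks n q).2.1.pos = q - 1 ∧
      (primFound cfg p toks n q).2.1.toknext = p.toknext + (if toks.isSome then 1 else 0) := by
  have hu : u32 ((q : Int) - 1) = q - 1 := u32_pred (by omega) hq32
  unfold primFound at hr ⊢
  cases toks with
  | none => exact ⟨hu, rfl⟩
  | some ts =>
    simp only at hr ⊢
    cases ha : allocToken cfg { p with pos := q } ts n with
    | none => rw [ha] at hr; exact absurd (show JSMN_ERROR_NOMEM < 0 by decide) hr
    | some x =>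
      obtain ⟨i, p1, ts1⟩ := x
      have hT : TokInv cfg { p with pos := q } ts n := h.tok.congr rfl rfl
      have ⟨hi, hin, htn, hpos', hsup, hT', hlen'⟩ := alloc_tok hT ha
      simp only [Option.isSome_some, if_true]
      simp only at hi
      exact ⟨hu, by omega⟩

/-- A successful jsmn_parse_primitive started at a character that is not a stop character leaves `pos` at the last character of the
primitive: not before where it was, inside the text; and has allocated one token (none in counting mode). -/
theorem parsePrimitive_next {cfg : Config} {js : List UInt8} (hlen : js.length < 4294967296) {fuel n : Nat} {p p' : Parser}
    {toks toks' : Option Tokens} {r : Int} (h : Inv cfg p toks n) (hm : more js p.pos = true)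
    (hstop : primStop cfg (charAt js p.pos) = false)
    (hp : parsePrimitive cfg js fuel p toks n = some (r, p', toks')) (hr : ¬ r < 0) :
    p.pos ≤ p'.pos ∧ p'.pos < js.length ∧ p'.toknext = p.toknext + (if toks.isSome then 1 else 0) := by
  rw [parsePrimitive_eq] at hp
  have hlt := more_lt hm
  have key : ∀ q, p.pos ≤ q → q ≤ js.length → q ≠ p.pos → some (primFound cfg p toks n q) = some (r, p', toks') →
      p.pos ≤ p'.pos ∧ p'.pos < js.length ∧ p'.toknext = p.toknext + (if toks.isSome then 1 else 0) := by
    intro q h1 h2 h3 he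
    simp only [Option.some.injEq] at he
    have := primFound_next (cfg := cfg) (q := q) h (by omega) (by omega) (by rw [he]; exact hr)
    rw [he] at this
    simp only at this
    omega
  split at hp
  · cases hp
  · cases hp; exact absurd (by decide) hr
  · rename_i q hq
    have hb := primScan_bounds hlen (Nat.le_of_lt hlt) hq
    simp only at hb
    split at hp
    · cases hp; exact absurd (by decide) hr
    · exact key q hb.1 hb.2.1 (by intro he; rw [he, hm] at hb; simp at hb) hp
  · rename_i q hq
    have hb := primScan_bounds hlen (Nat.le_of_lt hlt) hq
    simp only at hb
    exact key q hb.1 (Nat.le_of_lt hb.2.1) (by intro he; rw [he, hstop] at hb; simp at hb) hp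

/-- jsmn_parse_primitive ends when the fuel covers the rest of the text. -/
theorem parsePrimitive_total {cfg : Config} {js : List UInt8} (hlen : js.length < 4294967296) {fuel n : Nat} {p : Parser}
    {toks : Option Tokens} (hfuel : js.length - p.pos + 1 ≤ fuel) : ∃ x, parsePrimitive cfg js fuel p toks n = some x := by
  rw [parsePrimitive_eq]
  have ⟨r, hr⟩ := primScan_total (cfg := cfg) hlen hfuel
  rw [hr]
  cases r with
  | bad => exact ⟨_, rfl⟩
  | found q => exact ⟨_, rfl⟩
  | eoi q => simp only; split <;> exact ⟨_, rfl⟩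

/-- The walk up the parent links ends: the links decrease. -/
theorem closeLinks_total {cfg : Config} {n : Nat} {type : Nat} {s : St} {ts : Tokens} (hpl : cfg.parentLinks = true)
    (hT : TokInv cfg s.p ts n) {fuel : Nat} {idx : Int} (h0 : 0 ≤ idx) (h1 : idx < s.p.toknext) (hfuel : idx + 1 ≤ fuel) :
    ∃ st, closeLinks type s ts fuel idx = some st := by
  induction fuel generalizing idx with
  | zero => omega
  | succ f ih =>
    rw [closeLinks]
    simp only
    have hlink := hT.links hpl idx.toNat (by omega)
    rw [← tokAt_nonneg h0] at hlink
    split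
    · split <;> exact ⟨_, rfl⟩
    · split
      · split <;> exact ⟨_, rfl⟩
      · rename_i hne
        have hne' : (tokAt ts idx).parent ≠ -1 := by simpa using hne
        exact ih (by omega) (by omega) (by omega)

end Jsmn
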